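-- pv_equiv track=rewrite | github.com/ACEnglish/truvari | truvari/msatovcf.py | aln_to_vars
-- ===== SOURCE A (Python) =====
-- import copy
--
-- POSIDX = 1
--
-- REFIDX = 3
--
-- ALTIDX = 4
--
-- def decompose_variant(cur_variant):
--     """
--     Left trim and decompose (repl -> indel) variant
--     returns a list of new variants
--     """
--     def var_to_str(v):
--         return "\t".join([str(_) for _ in v])
--     ref = cur_variant[REFIDX]
--     alt = cur_variant[ALTIDX]
--     if ref == alt:
--         return []
--
--     # If anchor base is identical, we can move down
--     # Stop when there's only one base left or an unmached anchor base
--     trim = 0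
--     while trim < len(ref) - 1 and trim < len(alt) - 1 and ref[trim] == alt[trim]:
--         trim += 1
--     cur_variant[1] += trim
--     cur_variant[REFIDX] = ref[trim:]
--     cur_variant[ALTIDX] = alt[trim:]
--     if len(cur_variant[REFIDX]) == 1 or len(cur_variant[ALTIDX]) == 1:
--         return [var_to_str(cur_variant)]
--
--     # decompose REPL to DEL and INS - easier for truvari to compare
--     del_var = copy.copy(cur_variant)
--     del_var[ALTIDX] = del_var[ALTIDX][0]
--     del_var[REFIDX] = del_var[REFIDX][:-1]
--     in_var = copy.copy(cur_variant)
--     in_var[REFIDX] = in_var[REFIDX][-1]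
--     in_var[ALTIDX] = in_var[ALTIDX][1:]
--     in_var[POSIDX] += len(cur_variant[REFIDX]) - 1
--     return [var_to_str(del_var), var_to_str(in_var)]
--
-- def aln_to_vars(chrom, start_pos, ref_seq, alt_seq, anchor_base):
--     """
--     Zip the bases of an alignment and turn into variants
--     """
--     cur_variant = []
--     cur_pos = start_pos
--     # This is too long. need to have a separate zip method
--     for ref_base, alt_base in zip(ref_seq, alt_seq):
--         is_ref = ref_base != '-'
--         if ref_base == '-':
--             ref_base = ""
--         if alt_base == '-':
--             alt_base = ""
--
--         # gap on gap
--         if not ref_base and not alt_base: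
--             continue
--
--         if ref_base == alt_base:  # No variant
--             if cur_variant and is_ref:  # back to matching reference
--                 for variant in decompose_variant(cur_variant):
--                     yield variant
--                 cur_variant = []
--         else:
--             if not cur_variant:
--                 # -1 for the anchor base we're forcing on
--                 cur_variant = [chrom, cur_pos - 1, '.', anchor_base + ref_base,
--                                anchor_base + alt_base, '.', '.', '.', 'GT']
--             else:
--                 cur_variant[REFIDX] += ref_base
--                 cur_variant[ALTIDX] += alt_base
--         if is_ref:
--             cur_pos += 1
--             anchor_base = ref_base
--     # End Zipping
--     if cur_variant:
--         for variant in decompose_variant(cur_variant):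
--             yield variant
-- ===== SOURCE B (Python) =====
-- import copy
--
-- POSIDX = 1
--
-- REFIDX = 3
--
-- ALTIDX = 4
--
-- def decompose_variant(cur_variant):
--     """
--     Left trim and decompose (repl -> indel) variant
--     returns a list of new variants
--     """
--     def var_to_str(v):
--         return "\t".join([str(_) for _ in v])
--     ref = cur_variant[REFIDX]
--     alt = cur_variant[ALTIDX]
--     if ref == alt:
--         return []
--     trim = 0
--     while trim < len(ref) - 1 and trim < len(alt) - 1 and ref[trim] == alt[trim]:
--         trim += 1
--     cur_variant[1] += trim
--     cur_variant[REFIDX] = ref[trim:]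
--     cur_variant[ALTIDX] = alt[trim:]
--     if len(cur_variant[REFIDX]) == 1 or len(cur_variant[ALTIDX]) == 1:
--         return [var_to_str(cur_variant)]
--     del_var = copy.copy(cur_variant)
--     del_var[ALTIDX] = del_var[ALTIDX][0]
--     del_var[REFIDX] = del_var[REFIDX][:-1]
--     in_var = copy.copy(cur_variant)
--     in_var[REFIDX] = in_var[REFIDX][-1]
--     in_var[ALTIDX] = in_var[ALTIDX][1:]
--     in_var[POSIDX] += len(cur_variant[REFIDX]) - 1
--     return [var_to_str(del_var), var_to_str(in_var)]
--
-- def aln_to_vars(chrom, start_pos, ref_seq, alt_seq, anchor_base):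
--     """
--     Two-phase rewrite: build a column table, then segment it into maximal
--     mismatch runs and decompose each run.
--     """
--     cols = []
--     pos = start_pos
--     anchor = anchor_base
--     for r, a in zip(ref_seq, alt_seq):
--         if r == '-' and a == '-':
--             continue
--         er = '' if r == '-' else r
--         ea = '' if a == '-' else a
--         cols.append((er, ea, pos, anchor, er != ea))
--         if er:
--             pos += 1
--             anchor = er
--     i, n = 0, len(cols)
--     while i < n:
--         if not cols[i][4]:
--             i += 1
--             continue
--         j = i + 1
--         while j < n and cols[j][4]:
--             j += 1
--         p, anc = cols[i][2], cols[i][3]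
--         refs = ''.join(c[0] for c in cols[i:j])
--         alts = ''.join(c[1] for c in cols[i:j])
--         yield from decompose_variant([chrom, p - 1, '.', anc + refs, anc + alts,
--                                       '.', '.', '.', 'GT'])
--         i = j
-- ===== Notes on version B (the rewrite author's own statement) =====
-- stated objective: alternative
-- what changed: Replaces the streaming loop that mutates an open cur_variant record with a two-phase pass: build a column table (effective bases, position, anchor, mismatch flag), then segment it into maximal mismatch runs and decompose each run.
import Mathlib
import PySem

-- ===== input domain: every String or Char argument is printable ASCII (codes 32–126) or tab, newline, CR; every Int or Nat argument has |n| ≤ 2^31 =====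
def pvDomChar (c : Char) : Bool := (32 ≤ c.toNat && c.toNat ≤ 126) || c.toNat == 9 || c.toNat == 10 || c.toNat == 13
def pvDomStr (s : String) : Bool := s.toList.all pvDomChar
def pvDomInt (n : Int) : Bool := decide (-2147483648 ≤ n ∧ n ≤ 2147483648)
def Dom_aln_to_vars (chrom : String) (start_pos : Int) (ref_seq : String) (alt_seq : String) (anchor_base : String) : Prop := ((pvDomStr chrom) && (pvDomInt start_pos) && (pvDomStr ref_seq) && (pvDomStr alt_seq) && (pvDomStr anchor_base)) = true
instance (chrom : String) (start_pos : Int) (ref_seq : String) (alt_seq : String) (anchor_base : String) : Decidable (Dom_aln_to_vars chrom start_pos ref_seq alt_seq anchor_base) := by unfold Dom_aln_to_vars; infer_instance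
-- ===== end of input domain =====

-- B replaces A's streaming loop (mutable open cur_variant) with a two-phase pass: a column
-- table, then segmentation into maximal mismatch runs; same decompose_variant, same outputs.

-- ===== PORT A =====
-- shared helper: "\t".join of the 9 record fields (fields 0,2,5..8 are the constants
-- chrom,'.','.','.','.','GT'; the record carries the varying pos/ref/alt)
def varToStr (chrom : String) (pos : Int) (ref alt : List Char) : String :=
  chrom ++ "\t" ++ PySem.Int.toStr pos ++ "\t.\t" ++ String.ofList ref ++ "\t" ++ String.ofList alt
    ++ "\t.\t.\t.\tGT"

-- the `while trim < len(ref)-1 and trim < len(alt)-1 and ref[trim] == alt[trim]` loop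
def trimCount : List Char → List Char → Nat
  | a :: b :: r, c :: d :: s => if a = c then trimCount (b :: r) (d :: s) + 1 else 0
  | _, _ => 0

-- shared helper decompose_variant (identical in Source A and Source B).
-- Python indexes alt[0] / ref[-1]; the '?' defaults are hit exactly where Python raises
-- IndexError (one side empty, the other of length ≥ 2) — those inputs are outside Pre_.
def decompose (chrom : String) (pos : Int) (ref alt : List Char) : List String :=
  if ref = alt then []
  else
    let t := trimCount ref alt
    let pos := pos + t
    let ref := ref.drop t
    let alt := alt.drop t
    if ref.length = 1 ∨ alt.length = 1 then [varToStr chrom pos ref alt]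
    else
      [varToStr chrom pos ref.dropLast [alt.headD '?'],
       varToStr chrom (pos + ref.length - 1) [ref.getLastD '?'] alt.tail]

-- A's for-loop over zip(ref_seq, alt_seq); state = (pos, anchor, cur_variant?)
def alnLoop (chrom : String) : List (Char × Char) → Int → List Char →
    Option (Int × List Char × List Char) → List String
  | [], _, _, none => []
  | [], _, _, some (p, rf, al) => decompose chrom p rf al
  | (rb, ab) :: rest, pos, anchor, cv =>
    let is_ref := rb ≠ '-'
    let ref_base : List Char := if rb = '-' then [] else [rb]
    let alt_base : List Char := if ab = '-' then [] else [ab]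
    if ref_base = [] ∧ alt_base = [] then
      alnLoop chrom rest pos anchor cv
    else
      let pos' := if is_ref then pos + 1 else pos
      let anchor' := if is_ref then ref_base else anchor
      if ref_base = alt_base then
        match cv with
        | some (p, rf, al) =>
          if is_ref then decompose chrom p rf al ++ alnLoop chrom rest pos' anchor' none
          else alnLoop chrom rest pos' anchor' cv
        | none => alnLoop chrom rest pos' anchor' none
      else
        match cv with
        | none =>
          alnLoop chrom rest pos' anchor' (some (pos - 1, anchor ++ ref_base, anchor ++ alt_base))
        | some (p, rf, al) =>
          alnLoop chrom rest pos' anchor' (some (p, rf ++ ref_base, al ++ alt_base))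

def aln_to_vars (chrom : String) (start_pos : Int) (ref_seq : String) (alt_seq : String) (anchor_base : String) : List String :=
  alnLoop chrom (ref_seq.toList.zip alt_seq.toList) start_pos anchor_base.toList none

-- ===== PORT B =====
-- one table row: (effective ref base, effective alt base, pos, anchor, mismatch flag)
structure PvCol where
  er : List Char
  ea : List Char
  pos : Int
  anc : List Char
  mis : Bool
deriving Repr, DecidableEq

-- B's first pass: build the column table, skipping gap-on-gap columns
def buildCols : List (Char × Char) → Int → List Char → List PvCol
  | [], _, _ => []
  | (r, a) :: t, pos, anchor =>
    if r = '-' ∧ a = '-' then buildCols t pos anchor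
    else
      let er : List Char := if r = '-' then [] else [r]
      let ea : List Char := if a = '-' then [] else [a]
      ⟨er, ea, pos, anchor, decide (er ≠ ea)⟩ ::
        buildCols t (if er = [] then pos else pos + 1) (if er = [] then anchor else er)

-- B's second pass: the i/j while loops — segCols into maximal mismatch runs
def segCols (chrom : String) : List PvCol → List String
  | [] => []
  | c :: rest =>
    if c.mis then
      let run := rest.takeWhile PvCol.mis
      decompose chrom (c.pos - 1) (c.anc ++ (c.er ++ run.flatMap PvCol.er))
        (c.anc ++ (c.ea ++ run.flatMap PvCol.ea))
        ++ segCols chrom (rest.dropWhile PvCol.mis)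
    else segCols chrom rest
termination_by l => l.length
decreasing_by
  · exact Nat.lt_succ_of_le (List.length_dropWhile_le _ _)
  · exact Nat.lt_succ_self _

def aln_to_vars_alt (chrom : String) (start_pos : Int) (ref_seq : String) (alt_seq : String) (anchor_base : String) : List String :=
  segCols chrom (buildCols (ref_seq.toList.zip alt_seq.toList) start_pos anchor_base.toList)

-- ===== PRECONDITION & SPEC =====
-- Pre_ excludes exactly the inputs on which Python A raises IndexError inside
-- decompose_variant (B raises there too): anchor_base is empty and the first maximal
-- mismatch run of the (gap-on-gap-free) columns has length ≥ 2 and is pure insertion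
-- (all ref bases '-') or pure deletion (all alt bases '-').
def Pre_aln_to_vars (chrom : String) (start_pos : Int) (ref_seq : String) (alt_seq : String) (anchor_base : String) : Prop :=
  ¬ (anchor_base = "" ∧
     (let run := ((ref_seq.toList.zip alt_seq.toList).filter
         (fun p => ¬ (p.1 = '-' ∧ p.2 = '-'))).takeWhile (fun p => p.1 ≠ p.2)
      2 ≤ run.length ∧ (run.all (·.1 = '-') ∨ run.all (·.2 = '-'))))
instance (chrom : String) (start_pos : Int) (ref_seq : String) (alt_seq : String) (anchor_base : String) : Decidable (Pre_aln_to_vars chrom start_pos ref_seq alt_seq anchor_base) := by unfold Pre_aln_to_vars; infer_instance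

def pvWitness_aln_to_vars : String × Int × String × String × String :=
  ("chr1", 5, "AC-GT", "A-TGA", "A")

def Spec_aln_to_vars (chrom : String) (start_pos : Int) (ref_seq : String) (alt_seq : String) (anchor_base : String) (out : List String) : Prop := out = aln_to_vars_alt chrom start_pos ref_seq alt_seq anchor_base
instance (chrom : String) (start_pos : Int) (ref_seq : String) (alt_seq : String) (anchor_base : String) (out : List String) : Decidable (Spec_aln_to_vars chrom start_pos ref_seq alt_seq anchor_base out) := by unfold Spec_aln_to_vars; infer_instance

-- ===== CLAIM (what is proved, stated in full; the proofs are below) =====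
def Claim_equal_aln_to_vars : Prop := ∀ (chrom : String) (start_pos : Int) (ref_seq : String) (alt_seq : String) (anchor_base : String), Dom_aln_to_vars chrom start_pos ref_seq alt_seq anchor_base → Pre_aln_to_vars chrom start_pos ref_seq alt_seq anchor_base → Spec_aln_to_vars chrom start_pos ref_seq alt_seq anchor_base (aln_to_vars chrom start_pos ref_seq alt_seq anchor_base)

-- ===== LEMMAS AND PROOFS =====
theorem alnLoop_eq_segCols (chrom : String) (l : List (Char × Char)) :
    ∀ (pos : Int) (anchor : List Char),
      alnLoop chrom l pos anchor none = segCols chrom (buildCols l pos anchor) ∧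
      ∀ (p : Int) (rf al : List Char),
        alnLoop chrom l pos anchor (some (p, rf, al)) =
          decompose chrom p
            (rf ++ ((buildCols l pos anchor).takeWhile PvCol.mis).flatMap PvCol.er)
            (al ++ ((buildCols l pos anchor).takeWhile PvCol.mis).flatMap PvCol.ea)
          ++ segCols chrom ((buildCols l pos anchor).dropWhile PvCol.mis) := by
  induction l with
  | nil =>
    intro pos anchor
    exact ⟨by simp [alnLoop, buildCols, segCols], fun p rf al => by simp [alnLoop, buildCols, segCols]⟩
  | cons hd t ih =>
    obtain ⟨rb, ab⟩ := hd
    intro pos anchor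
    by_cases hr : rb = '-' <;> by_cases ha : ab = '-'
    · -- gap on gap: the column is skipped on both sides
      subst hr; subst ha
      refine ⟨?_, fun p rf al => ?_⟩
      · simpa [alnLoop, buildCols] using (ih pos anchor).1
      · simpa [alnLoop, buildCols] using (ih pos anchor).2 p rf al
    · -- insertion column: ref gap, alt base — mismatch, not is_ref
      subst hr
      refine ⟨?_, fun p rf al => ?_⟩
      · have H := (ih pos anchor).2 (pos - 1) anchor (anchor ++ [ab])
        simp [alnLoop, buildCols, segCols, ha] at H ⊢
        rw [H]
      · have H := (ih pos anchor).2 p rf (al ++ [ab])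
        simp [alnLoop, buildCols, segCols, ha] at H ⊢
        rw [H]
    · -- deletion column: ref base, alt gap — mismatch, is_ref
      subst ha
      refine ⟨?_, fun p rf al => ?_⟩
      · have H := (ih (pos + 1) [rb]).2 (pos - 1) (anchor ++ [rb]) anchor
        simp [alnLoop, buildCols, segCols, hr] at H ⊢
        rw [H]
      · have H := (ih (pos + 1) [rb]).2 p (rf ++ [rb]) al
        simp [alnLoop, buildCols, segCols, hr] at H ⊢
        rw [H]
    · by_cases hab : rb = ab
      · -- matching bases: close any open variant
        subst hab
        refine ⟨?_, fun p rf al => ?_⟩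
        · simpa [alnLoop, buildCols, segCols, hr] using (ih (pos + 1) [rb]).1
        · simpa [alnLoop, buildCols, segCols, hr] using (ih (pos + 1) [rb]).1
      · -- substitution column: mismatch, is_ref
        refine ⟨?_, fun p rf al => ?_⟩
        · have H := (ih (pos + 1) [rb]).2 (pos - 1) (anchor ++ [rb]) (anchor ++ [ab])
          simp [alnLoop, buildCols, segCols, hr, ha, hab] at H ⊢
          rw [H]
        · have H := (ih (pos + 1) [rb]).2 p (rf ++ [rb]) (al ++ [ab])
          simp [alnLoop, buildCols, segCols, hr, ha, hab] at H ⊢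
          rw [H]

-- ===== VERDICT (by name: the statement is the Claim_ definition above) =====
theorem aln_to_vars_spec : Claim_equal_aln_to_vars := by
  intro chrom start_pos ref_seq alt_seq anchor_base _ _
  unfold Spec_aln_to_vars aln_to_vars aln_to_vars_alt
  exact (alnLoop_eq_segCols chrom _ start_pos anchor_base.toList).1
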